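-- pv_equiv track=rewrite | github.com/shaoguangleo/autoFits | pybwlabel.py | NumberOfRuns
-- ===== SOURCE A (Python) =====
-- def size(IN):
--     M = len(IN[0])
--     N = len(IN)
--     return (M, N)
--
-- def NumberOfRuns(IN):
--     M, N = size(IN)
--     result = 0
--     if M != 0 and N != 0:
--         for col in IN:
--             if col[0] != 0:
--                 result += 1
--             for idx in range(1, M):
--                 if col[idx] != 0 and col[idx-1] == 0:
--                     result += 1
--     return result
-- ===== SOURCE B (Python) =====
-- def NumberOfRuns(IN):
--     M = len(IN[0])
--     cells = 0
--     adjacent = 0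
--     for row in IN:
--         cells += sum(1 for i in range(M) if row[i] != 0)
--         adjacent += sum(1 for i in range(1, M) if row[i] != 0 and row[i - 1] != 0)
--     return cells - adjacent
-- ===== Notes on version B (the rewrite author's own statement) =====
-- stated objective: alternative
-- what changed: B counts runs by the identity runs = nonzero cells - nonzero adjacent pairs (two flat counts per row), instead of A's run-start detection with a special case for column 0.
import Mathlib
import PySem

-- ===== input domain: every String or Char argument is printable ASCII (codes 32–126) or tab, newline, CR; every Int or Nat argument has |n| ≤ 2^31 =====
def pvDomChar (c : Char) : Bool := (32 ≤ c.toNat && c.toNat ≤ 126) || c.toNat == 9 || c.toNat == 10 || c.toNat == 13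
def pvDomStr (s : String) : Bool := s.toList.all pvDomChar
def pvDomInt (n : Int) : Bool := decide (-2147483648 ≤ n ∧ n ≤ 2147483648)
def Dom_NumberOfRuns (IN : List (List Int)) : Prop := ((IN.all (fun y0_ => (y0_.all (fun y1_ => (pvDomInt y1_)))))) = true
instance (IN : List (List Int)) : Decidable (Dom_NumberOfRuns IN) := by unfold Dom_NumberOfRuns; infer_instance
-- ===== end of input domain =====

-- B counts runs by the identity runs = nonzero cells − nonzero adjacent pairs, replacing
-- A's run-start detection with its column-0 special case (objective: alternative decomposition).

-- ===== PORT A =====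
-- helper 'size' of the Python module; IN[0] is guarded by Pre_ (IN ≠ []), ported with headD
def pvSize (IN : List (List Int)) : Int × Int :=
  ((PySem.List.len (IN.headD [])), PySem.List.len IN)

def NumberOfRuns (IN : List (List Int)) : Int :=
  let M := (pvSize IN).1
  let N := (pvSize IN).2
  let result : Int := 0
  if M ≠ 0 ∧ N ≠ 0 then
    IN.foldl (fun result col =>
      let result := if PySem.List.pyGetD col 0 0 ≠ 0 then result + 1 else result
      (PySem.List.pyRange 1 M 1).foldl (fun result idx =>
        if PySem.List.pyGetD col idx 0 ≠ 0 ∧ PySem.List.pyGetD col (idx - 1) 0 = 0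
        then result + 1 else result) result) result
  else result

-- ===== PORT B =====
def NumberOfRuns_alt (IN : List (List Int)) : Int :=
  let M := PySem.List.len (IN.headD [])
  let p := IN.foldl (fun (acc : Int × Int) row =>
      (acc.1 + ((PySem.List.pyRange 0 M 1).countP
          (fun i => PySem.List.pyGetD row i 0 != 0) : Int),
       acc.2 + ((PySem.List.pyRange 1 M 1).countP
          (fun i => PySem.List.pyGetD row i 0 != 0 && PySem.List.pyGetD row (i - 1) 0 != 0) : Int)))
    ((0 : Int), (0 : Int))
  p.1 - p.2

-- ===== PRECONDITION & SPEC =====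
-- Pre_ excludes exactly the inputs where the Pythons raise IndexError: empty IN (IN[0]),
-- and rows shorter than len(IN[0]) (col[idx] out of range); both A and B raise there.
def Pre_NumberOfRuns (IN : List (List Int)) : Prop :=
  IN ≠ [] ∧ ∀ row ∈ IN, (IN.headD []).length ≤ row.length
instance (IN : List (List Int)) : Decidable (Pre_NumberOfRuns IN) := by
  unfold Pre_NumberOfRuns; infer_instance

def pvWitness_NumberOfRuns : List (List Int) := [[1, 0, 2], [0, 3, 4]]

def Spec_NumberOfRuns (IN : List (List Int)) (out : Int) : Prop := out = NumberOfRuns_alt IN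
instance (IN : List (List Int)) (out : Int) : Decidable (Spec_NumberOfRuns IN out) := by
  unfold Spec_NumberOfRuns; infer_instance

-- ===== CLAIM (what is proved, stated in full; the proofs are below) =====
def Claim_equal_NumberOfRuns : Prop := ∀ (IN : List (List Int)), Dom_NumberOfRuns IN → Pre_NumberOfRuns IN → Spec_NumberOfRuns IN (NumberOfRuns IN)

-- ===== LEMMAS AND PROOFS =====

-- splitting a count by a second test
theorem countP_split_and {α : Type} (l : List α) (p q : α → Bool) :
    l.countP (fun x => p x && q x) + l.countP (fun x => p x && !q x) = l.countP p := by
  induction l with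
  | nil => rfl
  | cons a t ih =>
    by_cases hp : p a = true <;> by_cases hq : q a = true <;>
      simp [hp, hq] <;> omega

-- per-row: run starts = nonzero cells − nonzero adjacent pairs (over indices 0..M-1 resp. 1..M-1)
theorem row_eq (M : Int) (col : List Int) (hM : 0 < M) :
    (if PySem.List.pyGetD col 0 0 ≠ 0 then (1 : Int) else 0)
      + ((PySem.List.pyRange 1 M 1).countP
          (fun i => decide (PySem.List.pyGetD col i 0 ≠ 0 ∧ PySem.List.pyGetD col (i - 1) 0 = 0)) : Int)
    = ((PySem.List.pyRange 0 M 1).countP (fun i => PySem.List.pyGetD col i 0 != 0) : Int)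
      - ((PySem.List.pyRange 1 M 1).countP
          (fun i => PySem.List.pyGetD col i 0 != 0 && PySem.List.pyGetD col (i - 1) 0 != 0) : Int) := by
  have h0 : PySem.List.pyRange 0 M 1 = 0 :: PySem.List.pyRange 1 M 1 := by
    have := PySem.List.pyRange_one_cons (a := 0) (b := M) hM
    simpa using this
  rw [h0, List.countP_cons]
  have hsplit := countP_split_and (PySem.List.pyRange 1 M 1)
    (fun i => PySem.List.pyGetD col i 0 != 0)
    (fun i => PySem.List.pyGetD col (i - 1) 0 != 0)
  have hcong : (PySem.List.pyRange 1 M 1).countP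
      (fun i => decide (PySem.List.pyGetD col i 0 ≠ 0 ∧ PySem.List.pyGetD col (i - 1) 0 = 0))
      = (PySem.List.pyRange 1 M 1).countP
      (fun i => (PySem.List.pyGetD col i 0 != 0) && !(PySem.List.pyGetD col (i - 1) 0 != 0)) := by
    apply List.countP_congr
    intro i _
    by_cases h1 : PySem.List.pyGetD col i 0 = 0 <;>
      by_cases h2 : PySem.List.pyGetD col (i - 1) 0 = 0 <;> simp [h1, h2]
  rw [hcong]
  by_cases hc : PySem.List.pyGetD col 0 0 = 0 <;> simp [hc] <;> omega

-- sum of pointwise differences (no fitting Mathlib lemma found by search)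
theorem sum_map_sub_int {α : Type} (l : List α) (f g : α → Int) :
    (l.map (fun x => f x - g x)).sum = (l.map f).sum - (l.map g).sum := by
  induction l with
  | nil => simp
  | cons x t ih => simp [ih]; ring

-- two independent Int accumulators summed over a list
theorem foldl_pair_add {α : Type} (l : List α) (f g : α → Int) (a b : Int) :
    l.foldl (fun (acc : Int × Int) x => (acc.1 + f x, acc.2 + g x)) (a, b)
      = (a + (l.map f).sum, b + (l.map g).sum) := by
  induction l generalizing a b with
  | nil => simp
  | cons x t ih => simp [ih, add_assoc]

-- ===== VERDICT (by name: the statement is the Claim_ definition above) =====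
theorem NumberOfRuns_spec : Claim_equal_NumberOfRuns := by
  intro IN _ hPre
  obtain ⟨hne, _⟩ := hPre
  unfold Spec_NumberOfRuns NumberOfRuns NumberOfRuns_alt pvSize
  simp only [PySem.List.len_eq]
  set M : Int := ((IN.headD []).length : Int) with hMdef
  have hM0 : 0 ≤ M := by positivity
  by_cases hM : M = 0
  · -- M = 0: A returns 0; B's ranges are empty, both counts 0
    have hr0 : PySem.List.pyRange 0 M 1 = [] := PySem.List.pyRange_one_eq_nil (by omega)
    have hr1 : PySem.List.pyRange 1 M 1 = [] := PySem.List.pyRange_one_eq_nil (by omega)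
    simp only [hr0, hr1, List.countP_nil]
    rw [foldl_pair_add]
    simp [hM]
  · have hN : (IN.length : Int) ≠ 0 :=
      Int.natCast_ne_zero.mpr (fun h0 => hne (List.length_eq_zero_iff.mp h0))
    simp only [hM, hN, ne_eq, not_false_eq_true, and_self, if_true]
    rw [foldl_pair_add]
    dsimp only
    -- rewrite A's fold into per-row additions
    have hA : ∀ (init : Int), IN.foldl (fun result col =>
        (PySem.List.pyRange 1 M 1).foldl (fun result idx =>
          if PySem.List.pyGetD col idx 0 ≠ 0 ∧ PySem.List.pyGetD col (idx - 1) 0 = 0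
          then result + 1 else result)
          (if PySem.List.pyGetD col 0 0 ≠ 0 then result + 1 else result)) init
        = init + (IN.map (fun col =>
            (if PySem.List.pyGetD col 0 0 ≠ 0 then (1 : Int) else 0)
            + ((PySem.List.pyRange 1 M 1).countP
                (fun i => decide (PySem.List.pyGetD col i 0 ≠ 0 ∧ PySem.List.pyGetD col (i - 1) 0 = 0)) : Int))).sum := by
      intro init
      rw [PySem.List.foldl_congr_mem (g := fun (result : Int) col => result +
          ((if PySem.List.pyGetD col 0 0 ≠ 0 then (1 : Int) else 0)
            + ((PySem.List.pyRange 1 M 1).countP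
                (fun i => decide (PySem.List.pyGetD col i 0 ≠ 0 ∧ PySem.List.pyGetD col (i - 1) 0 = 0)) : Int)))
          (h := by
            intro acc col _
            rw [PySem.List.foldl_ite_add_one]
            by_cases hc : PySem.List.pyGetD col 0 0 = 0 <;> simp [hc] <;> ring)]
      rw [PySem.List.foldl_add]
    rw [hA]
    -- per-row identity, then sum
    have hrow : ∀ (col : List Int), (if PySem.List.pyGetD col 0 0 ≠ 0 then (1 : Int) else 0)
        + ((PySem.List.pyRange 1 M 1).countP
            (fun i => decide (PySem.List.pyGetD col i 0 ≠ 0 ∧ PySem.List.pyGetD col (i - 1) 0 = 0)) : Int)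
        = ((PySem.List.pyRange 0 M 1).countP (fun i => PySem.List.pyGetD col i 0 != 0) : Int)
          - ((PySem.List.pyRange 1 M 1).countP
              (fun i => PySem.List.pyGetD col i 0 != 0 && PySem.List.pyGetD col (i - 1) 0 != 0) : Int) :=
      fun col => row_eq M col (by omega)
    rw [List.map_congr_left (fun col _ => hrow col), sum_map_sub_int]
    ring
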